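-- pv_equiv track=rewrite | github.com/babiswas/python-practise-2022-heap- | test602.py | find_indices_diff
-- ===== SOURCE A (Python) =====
-- def find_indices_diff(arr):
--     index1=0
--     index2=0
--     test=True
--     min=99999
--     for i in range(len(arr)):
--        index1=i
--        if i+1<len(arr):
--           for j in range(i+1,len(arr)):
--                if arr[i]<=arr[j]:
--                   index1=index1+1
--                   while index1<j:
--                       if arr[index1]<arr[j] and arr[index1]>arr[i]:
--                          test=False
--                          break
--                       index1=index1+1
--                   if test and i+1!=j:
--                      if min>abs(i-j):
--                         min=abs(i-j)
--        test=True
--     return min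
-- ===== SOURCE B (Python) =====
-- def find_indices_diff(arr):
--     best = 99999
--     for j in range(2, len(arr)):
--         for i in range(j - 2, -1, -1):
--             if arr[i] <= arr[j]:
--                 if j - i < best:
--                     best = j - i
--                 break
--     return best
-- ===== Notes on version B (the rewrite author's own statement) =====
-- stated objective: faster
-- what changed: A's triple nested i-outer loop (forward j-scan plus a between-value while-check that can never fire) is replaced by a j-outer loop whose inner backward scan stops at the nearest i with arr[i] <= arr[j], so each position contributes one candidate gap instead of a full pair enumeration.
import Mathlib
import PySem

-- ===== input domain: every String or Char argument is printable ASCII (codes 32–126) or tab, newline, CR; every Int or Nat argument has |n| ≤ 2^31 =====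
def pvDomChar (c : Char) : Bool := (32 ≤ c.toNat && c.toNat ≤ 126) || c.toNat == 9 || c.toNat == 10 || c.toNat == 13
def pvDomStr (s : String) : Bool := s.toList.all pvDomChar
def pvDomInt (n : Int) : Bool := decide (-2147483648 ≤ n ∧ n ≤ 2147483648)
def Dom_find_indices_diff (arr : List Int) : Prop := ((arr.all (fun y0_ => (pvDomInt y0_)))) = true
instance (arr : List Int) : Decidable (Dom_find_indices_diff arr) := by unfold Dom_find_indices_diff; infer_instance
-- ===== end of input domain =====

-- B replaces A's triple nested pair enumeration by a j-outer loop whose backward inner scan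
-- breaks at the nearest matching i; both are total and agree everywhere.

-- every index either program forms is in range along every execution, so the default 0 of pyGetD is never read
def pvAt (arr : List Int) (k : Int) : Int := PySem.List.pyGetD arr k 0

-- ===== PORT A =====
-- the Python `while index1 < j: …` loop (break ↦ early return with test = false)
def pvWhile (arr : List Int) (i j index1 : Int) (test : Bool) : Int × Bool :=
  if index1 < j then
    if pvAt arr index1 < pvAt arr j ∧ pvAt arr index1 > pvAt arr i then (index1, false)
    else pvWhile arr i j (index1 + 1) test
  else (index1, test)
termination_by (j - index1).toNat
decreasing_by omega

-- body of `for j in range(i+1, len(arr))`; state = (index1, test, min)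
def pvJStep (arr : List Int) (i : Int) (st : Int × Bool × Int) (j : Int) : Int × Bool × Int :=
  if pvAt arr i ≤ pvAt arr j then
    let p := pvWhile arr i j (st.1 + 1) st.2.1
    let mn := if p.2 ∧ i + 1 ≠ j then (if st.2.2 > |i - j| then |i - j| else st.2.2) else st.2.2
    (p.1, p.2, mn)
  else st

-- body of `for i in range(len(arr))` (the dead variable index2, assigned 0 and never read, is omitted)
def pvIStep (arr : List Int) (st : Int × Bool × Int) (i : Int) : Int × Bool × Int :=
  let st2 := if i + 1 < (arr.length : Int) then
      (PySem.List.pyRange (i + 1) (arr.length : Int) 1).foldl (pvJStep arr i) (i, st.2.1, st.2.2)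
    else (i, st.2.1, st.2.2)
  (st2.1, true, st2.2.2)

def find_indices_diff (arr : List Int) : Int :=
  ((PySem.List.pyRange 0 (arr.length : Int) 1).foldl (pvIStep arr) (0, true, 99999)).2.2

-- ===== PORT B =====
-- `for i in range(j-2, -1, -1): if arr[i] <= arr[j]: (update best); break`
def pvScan (arr : List Int) (j i best : Int) : Int :=
  if 0 ≤ i then
    if pvAt arr i ≤ pvAt arr j then (if j - i < best then j - i else best)
    else pvScan arr j (i - 1) best
  else best
termination_by (i + 1).toNat
decreasing_by omega

def find_indices_diff_alt (arr : List Int) : Int :=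
  (PySem.List.pyRange 2 (arr.length : Int) 1).foldl (fun best j => pvScan arr j (j - 2) best) 99999

-- ===== PRECONDITION & SPEC =====
def Spec_find_indices_diff (arr : List Int) (out : Int) : Prop := out = find_indices_diff_alt arr
instance (arr : List Int) (out : Int) : Decidable (Spec_find_indices_diff arr out) := by unfold Spec_find_indices_diff; infer_instance

-- ===== CLAIM (what is proved, stated in full; the proofs are below) =====
def Claim_equal_find_indices_diff : Prop := ∀ (arr : List Int), Dom_find_indices_diff arr → Spec_find_indices_diff arr (find_indices_diff arr)

-- ===== LEMMAS AND PROOFS =====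

-- the clean per-i minimum update A's inner loop amounts to
def pvCUpd (arr : List Int) (i mn j : Int) : Int :=
  if pvAt arr i ≤ pvAt arr j ∧ i + 1 ≠ j ∧ mn > j - i then j - i else mn

def pvCleanI (arr : List Int) (mn i : Int) : Int :=
  (PySem.List.pyRange (i + 1) (arr.length : Int) 1).foldl (pvCUpd arr i) mn

-- the while loop never breaks when everything in [index1, j) is ≤ arr[i]
lemma pvWhile_no_trigger (arr : List Int) (i j index1 : Int) (test : Bool)
    (hle : index1 ≤ j)
    (h : ∀ k, index1 ≤ k → k < j → ¬ (pvAt arr k > pvAt arr i)) :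
    pvWhile arr i j index1 test = (j, test) := by
  have main : ∀ (c : Nat) (index1 : Int), j - index1 ≤ (c : Int) → index1 ≤ j →
      (∀ k, index1 ≤ k → k < j → ¬ (pvAt arr k > pvAt arr i)) →
      pvWhile arr i j index1 test = (j, test) := by
    intro c
    induction c with
    | zero =>
      intro index1 hc hle h
      have : index1 = j := by omega
      subst this
      rw [pvWhile, if_neg (by omega)]
    | succ c ih =>
      intro index1 hc hle h
      by_cases hlt : index1 < j
      · rw [pvWhile, if_pos hlt,
          if_neg (by intro hx; exact h index1 le_rfl hlt hx.2)]
        exact ih (index1 + 1) (by omega) (by omega) (fun k hk => h k (by omega))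
      · have : index1 = j := by omega
        subst this
        rw [pvWhile, if_neg (by omega)]
  exact main (j - index1).toNat index1 (by omega) hle h

-- invariant of the inner fold: everything strictly between index1 and m is < arr[i]
def pvInv (arr : List Int) (i index1 m : Int) : Prop :=
  index1 < m ∧ ∀ k, index1 < k → k < m → pvAt arr k < pvAt arr i

lemma pvInner_fold (arr : List Int) (i : Int) :
    ∀ (c : Nat) (m index1 mn : Int), (arr.length : Int) - m ≤ (c : Int) → i < m →
    pvInv arr i index1 m →
    ∃ idx', (PySem.List.pyRange m (arr.length : Int) 1).foldl (pvJStep arr i) (index1, true, mn)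
      = (idx', true, (PySem.List.pyRange m (arr.length : Int) 1).foldl (pvCUpd arr i) mn) := by
  intro c
  induction c with
  | zero =>
    intro m index1 mn hc him hinv
    rw [PySem.List.pyRange_one_eq_nil (by omega)]
    exact ⟨index1, rfl⟩
  | succ c ih =>
    intro m index1 mn hc him hinv
    obtain ⟨hinv1, hinv2⟩ := hinv
    by_cases hm : (arr.length : Int) ≤ m
    · rw [PySem.List.pyRange_one_eq_nil (by omega)]
      exact ⟨index1, rfl⟩
    · rw [PySem.List.pyRange_one_cons (by omega), List.foldl_cons, List.foldl_cons]
      by_cases hq : pvAt arr i ≤ pvAt arr m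
      · have hw : pvWhile arr i m (index1 + 1) true = (m, true) := by
          apply pvWhile_no_trigger arr i m (index1 + 1) true (by omega)
          intro k hk1 hk2 hgt
          have := hinv2 k (by omega) hk2
          omega
        have hstep : pvJStep arr i (index1, true, mn) m = (m, true, pvCUpd arr i mn m) := by
          unfold pvJStep
          rw [if_pos hq]
          simp only [hw]
          have habs : |i - m| = m - i := by rw [abs_of_neg (by omega)]; ring
          unfold pvCUpd
          rw [habs]
          split_ifs <;> simp_all
        rw [hstep]
        exact ih (m + 1) m (pvCUpd arr i mn m) (by omega) (by omega)
          ⟨by omega, fun k hk1 hk2 => by omega⟩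
      · have hstep : pvJStep arr i (index1, true, mn) m = (index1, true, pvCUpd arr i mn m) := by
          unfold pvJStep pvCUpd
          rw [if_neg hq, if_neg (by tauto)]
        rw [hstep]
        refine ih (m + 1) index1 (pvCUpd arr i mn m) (by omega) (by omega)
          ⟨by omega, fun k hk1 hk2 => ?_⟩
        by_cases hkm : k < m
        · exact hinv2 k hk1 hkm
        · have : k = m := by omega
          subst this
          omega

lemma pvOuter_fold (arr : List Int) :
    find_indices_diff arr
      = (PySem.List.pyRange 0 (arr.length : Int) 1).foldl (pvCleanI arr) 99999 := by
  have aux : ∀ (l : List Int) (idx mn : Int),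
      (l.foldl (pvIStep arr) (idx, true, mn)).2.2 = l.foldl (pvCleanI arr) mn := by
    intro l
    induction l with
    | nil => intro idx mn; rfl
    | cons i t ih =>
      intro idx mn
      rw [List.foldl_cons, List.foldl_cons]
      have hstep : ∃ X, pvIStep arr (idx, true, mn) i = (X, true, pvCleanI arr mn i) := by
        unfold pvIStep
        by_cases hi : i + 1 < (arr.length : Int)
        · rw [if_pos hi]
          obtain ⟨idx', he⟩ := pvInner_fold arr i ((arr.length : Int) - (i + 1)).toNat
            (i + 1) i mn (by omega) (by omega) ⟨by omega, fun k hk1 hk2 => by omega⟩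
          rw [he]
          exact ⟨idx', rfl⟩
        · rw [if_neg hi]
          refine ⟨i, ?_⟩
          unfold pvCleanI
          rw [PySem.List.pyRange_one_eq_nil (by omega)]
          rfl
      obtain ⟨X, he⟩ := hstep
      rw [he, ih]
  unfold find_indices_diff
  exact aux _ 0 99999

lemma pvCUpd_le (arr : List Int) (i mn j : Int) : pvCUpd arr i mn j ≤ mn := by
  unfold pvCUpd; split_ifs with h
  · omega
  · exact le_refl mn

-- fold of pvCUpd never increases
lemma pvFoldC_le (arr : List Int) (i : Int) :
    ∀ (l : List Int) (mn : Int), l.foldl (pvCUpd arr i) mn ≤ mn := by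
  intro l
  induction l with
  | nil => intro mn; exact le_refl mn
  | cons j t ih =>
    intro mn
    rw [List.foldl_cons]
    exact le_trans (ih _) (pvCUpd_le arr i mn j)

lemma pvCleanI_le (arr : List Int) (mn i : Int) : pvCleanI arr mn i ≤ mn := by
  exact pvFoldC_le arr i _ mn

lemma pvFoldI_le (arr : List Int) :
    ∀ (l : List Int) (mn : Int), l.foldl (pvCleanI arr) mn ≤ mn := by
  intro l
  induction l with
  | nil => intro mn; exact le_refl mn
  | cons i t ih =>
    intro mn
    rw [List.foldl_cons]
    exact le_trans (ih _) (pvCleanI_le arr mn i)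

-- membership: A's clean result is the initial value or a recorded feasible gap
lemma pvFoldC_mem (arr : List Int) (i : Int) :
    ∀ (l : List Int) (mn : Int), l.foldl (pvCUpd arr i) mn = mn ∨
      ∃ j ∈ l, pvAt arr i ≤ pvAt arr j ∧ i + 1 ≠ j ∧ l.foldl (pvCUpd arr i) mn = j - i := by
  intro l
  induction l with
  | nil => intro mn; exact Or.inl rfl
  | cons j t ih =>
    intro mn
    rw [List.foldl_cons]
    rcases ih (pvCUpd arr i mn j) with h | ⟨j', hj', hq, hne, he⟩
    · rw [h]
      unfold pvCUpd
      split_ifs with hc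
      · exact Or.inr ⟨j, List.mem_cons_self, hc.1, hc.2.1, rfl⟩
      · exact Or.inl rfl
    · exact Or.inr ⟨j', List.mem_cons_of_mem j hj', hq, hne, he⟩

lemma pvFoldI_mem (arr : List Int) :
    ∀ (l : List Int) (mn : Int), l.foldl (pvCleanI arr) mn = mn ∨
      ∃ i ∈ l, ∃ j, i + 1 < j ∧ j < (arr.length : Int) ∧ pvAt arr i ≤ pvAt arr j ∧
        l.foldl (pvCleanI arr) mn = j - i := by
  intro l
  induction l with
  | nil => intro mn; exact Or.inl rfl
  | cons i t ih =>
    intro mn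
    rw [List.foldl_cons]
    rcases ih (pvCleanI arr mn i) with h | ⟨i', hi', j, h1, h2, h3, he⟩
    · rw [h]
      rcases pvFoldC_mem arr i (PySem.List.pyRange (i + 1) (arr.length : Int) 1) mn
        with h2 | ⟨j, hj, hq, hne, he⟩
      · exact Or.inl h2
      · rw [PySem.List.mem_pyRange_one] at hj
        exact Or.inr ⟨i, List.mem_cons_self, j, by omega, hj.2, hq, he⟩
    · exact Or.inr ⟨i', List.mem_cons_of_mem i hi', j, h1, h2, h3, he⟩

-- upper bound: every feasible pair bounds A's clean result
lemma pvClean_le_pair (arr : List Int) (i j : Int)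
    (h0 : 0 ≤ i) (h2 : i + 2 ≤ j) (hj : j < (arr.length : Int))
    (hq : pvAt arr i ≤ pvAt arr j) :
    (PySem.List.pyRange 0 (arr.length : Int) 1).foldl (pvCleanI arr) 99999 ≤ j - i := by
  have hs1 : PySem.List.pyRange i (arr.length : Int) 1
      = i :: PySem.List.pyRange (i + 1) (arr.length : Int) 1 :=
    PySem.List.pyRange_one_cons (by omega)
  rw [PySem.List.pyRange_one_append 0 i (arr.length : Int) h0 (by omega),
    hs1, List.foldl_append, List.foldl_cons]
  refine le_trans (pvFoldI_le arr _ _) ?_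
  unfold pvCleanI
  have hs2 : PySem.List.pyRange j (arr.length : Int) 1
      = j :: PySem.List.pyRange (j + 1) (arr.length : Int) 1 :=
    PySem.List.pyRange_one_cons (by omega)
  rw [PySem.List.pyRange_one_append (i + 1) j (arr.length : Int) (by omega) (by omega),
    hs2, List.foldl_append, List.foldl_cons]
  refine le_trans (pvFoldC_le arr i _ _) ?_
  unfold pvCUpd
  split_ifs with hc
  · omega
  · simp only [hq, true_and] at hc
    omega

-- ===== B-side lemmas =====

lemma pvScan_le (arr : List Int) (j : Int) :
    ∀ (c : Nat) (i best : Int), (i + 1) ≤ (c : Int) + 0 → pvScan arr j i best ≤ best := by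
  intro c
  induction c with
  | zero =>
    intro i best hc
    rw [pvScan, if_neg (by omega)]
  | succ c ih =>
    intro i best hc
    rw [pvScan]
    by_cases h0 : 0 ≤ i
    · rw [if_pos h0]
      by_cases hq : pvAt arr i ≤ pvAt arr j
      · rw [if_pos hq]
        split_ifs <;> omega
      · rw [if_neg hq]
        exact ih (i - 1) best (by omega)
    · rw [if_neg h0]

lemma pvScan_le' (arr : List Int) (j i best : Int) : pvScan arr j i best ≤ best :=
  pvScan_le arr j (i + 1).toNat i best (by omega)

-- membership: the scan returns best or j - i' for some matching i' ≤ i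
lemma pvScan_mem (arr : List Int) (j : Int) :
    ∀ (c : Nat) (i best : Int), (i + 1) ≤ (c : Int) →
      pvScan arr j i best = best ∨
      ∃ i', 0 ≤ i' ∧ i' ≤ i ∧ pvAt arr i' ≤ pvAt arr j ∧ pvScan arr j i best = j - i' := by
  intro c
  induction c with
  | zero =>
    intro i best hc
    rw [pvScan, if_neg (by omega)]
    exact Or.inl rfl
  | succ c ih =>
    intro i best hc
    rw [pvScan]
    by_cases h0 : 0 ≤ i
    · rw [if_pos h0]
      by_cases hq : pvAt arr i ≤ pvAt arr j
      · rw [if_pos hq]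
        by_cases hlt : j - i < best
        · rw [if_pos hlt]
          exact Or.inr ⟨i, h0, le_refl i, hq, rfl⟩
        · rw [if_neg hlt]
          exact Or.inl rfl
      · rw [if_neg hq]
        rcases ih (i - 1) best (by omega) with h | ⟨i', h1, h2, h3, h4⟩
        · exact Or.inl h
        · exact Or.inr ⟨i', h1, by omega, h3, h4⟩
    · rw [if_neg h0]
      exact Or.inl rfl

-- upper bound: a matching i0 ≤ i bounds the scan's result by j - i0
lemma pvScan_le_pair (arr : List Int) (j : Int) :
    ∀ (c : Nat) (i best i0 : Int), (i + 1) ≤ (c : Int) →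
      0 ≤ i0 → i0 ≤ i → pvAt arr i0 ≤ pvAt arr j →
      pvScan arr j i best ≤ j - i0 := by
  intro c
  induction c with
  | zero => intro i best i0 hc h0 hle hq; omega
  | succ c ih =>
    intro i best i0 hc h0 hle hq
    rw [pvScan, if_pos (by omega)]
    split_ifs with hqq hlt
    · omega
    · omega
    · by_cases hii : i0 = i
      · subst hii; exact absurd hq hqq
      · exact ih (i - 1) best i0 (by omega) h0 (by omega) hq

-- B's fold never increases
lemma pvFoldB_le (arr : List Int) :
    ∀ (l : List Int) (best : Int),
      l.foldl (fun best j => pvScan arr j (j - 2) best) best ≤ best := by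
  intro l
  induction l with
  | nil => intro best; exact le_refl best
  | cons j t ih =>
    intro best
    rw [List.foldl_cons]
    exact le_trans (ih _) (pvScan_le' arr j (j - 2) best)

-- B's result is the initial value or a feasible gap
lemma pvFoldB_mem (arr : List Int) :
    ∀ (l : List Int) (best : Int),
      l.foldl (fun best j => pvScan arr j (j - 2) best) best = best ∨
      ∃ j ∈ l, ∃ i', 0 ≤ i' ∧ i' + 2 ≤ j ∧ pvAt arr i' ≤ pvAt arr j ∧
        l.foldl (fun best j => pvScan arr j (j - 2) best) best = j - i' := by
  intro l
  induction l with
  | nil => intro best; exact Or.inl rfl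
  | cons j t ih =>
    intro best
    rw [List.foldl_cons]
    rcases ih (pvScan arr j (j - 2) best) with h | ⟨j', hj', i', h1, h2, h3, h4⟩
    · rw [h]
      rcases pvScan_mem arr j (j - 2 + 1).toNat (j - 2) best (by omega)
        with h | ⟨i', h1, h2, h3, h4⟩
      · exact Or.inl h
      · exact Or.inr ⟨j, List.mem_cons_self, i', h1, by omega, h3, h4⟩
    · exact Or.inr ⟨j', List.mem_cons_of_mem j hj', i', h1, h2, h3, h4⟩

-- every feasible pair bounds B's result
lemma pvB_le_pair (arr : List Int) (i j : Int)
    (h0 : 0 ≤ i) (h2 : i + 2 ≤ j) (hj : j < (arr.length : Int))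
    (hq : pvAt arr i ≤ pvAt arr j) :
    find_indices_diff_alt arr ≤ j - i := by
  unfold find_indices_diff_alt
  have hs : PySem.List.pyRange j (arr.length : Int) 1
      = j :: PySem.List.pyRange (j + 1) (arr.length : Int) 1 :=
    PySem.List.pyRange_one_cons (by omega)
  rw [PySem.List.pyRange_one_append 2 j (arr.length : Int) (by omega) (by omega),
    hs, List.foldl_append, List.foldl_cons]
  refine le_trans (pvFoldB_le arr _ _) ?_
  exact pvScan_le_pair arr j (j - 2 + 1).toNat (j - 2) _ i (by omega) h0 (by omega) hq

-- ===== VERDICT (by name: the statement is the Claim_ definition above) =====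
theorem find_indices_diff_spec : Claim_equal_find_indices_diff := by
  intro arr _
  unfold Spec_find_indices_diff
  rw [pvOuter_fold]
  set AV := (PySem.List.pyRange 0 (arr.length : Int) 1).foldl (pvCleanI arr) 99999 with hAV
  set BV := find_indices_diff_alt arr with hBV
  have hA99 : AV ≤ 99999 := pvFoldI_le arr _ _
  have hB99 : BV ≤ 99999 := pvFoldB_le arr _ _
  have hAB : AV ≤ BV := by
    rcases pvFoldB_mem arr (PySem.List.pyRange 2 (arr.length : Int) 1) 99999
      with h | ⟨j, hj, i', h1, h2, h3, h4⟩
    · rw [hBV]; unfold find_indices_diff_alt; rw [h]; exact hA99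
    · rw [PySem.List.mem_pyRange_one] at hj
      have : BV = j - i' := by rw [hBV]; unfold find_indices_diff_alt; exact h4
      rw [this]
      exact pvClean_le_pair arr i' j h1 h2 hj.2 h3
  have hBA : BV ≤ AV := by
    rcases pvFoldI_mem arr (PySem.List.pyRange 0 (arr.length : Int) 1) 99999
      with h | ⟨i, hi, j, h1, h2, h3, h4⟩
    · rw [← hAV] at h; rw [h]; exact hB99
    · rw [PySem.List.mem_pyRange_one] at hi
      rw [← hAV] at h4; rw [h4]
      exact pvB_le_pair arr i j hi.1 (by omega) h2 h3
  omega
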